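-- pv_equiv track=rewrite | github.com/gravitywavelet/sgm-anon | PGM_Ex5/ex5_from_sql.py | cfg_changes_string
-- ===== SOURCE A (Python) =====
-- def cfg_changes_string(prop_cfg: dict, inc_cfg: dict):
--     if not isinstance(prop_cfg, dict): prop_cfg = {}
--     if not isinstance(inc_cfg, dict):  inc_cfg  = {}
--     diffs = []
--     for k, v in prop_cfg.items():
--         if inc_cfg.get(k, None) != v:
--             if isinstance(v, (int,float,str)) and len(str(v)) <= 16:
--                 diffs.append(f"{k}={v}")
--             else:
--                 diffs.append(f"{k}*")
--     order = ["weight_decay","ema_decay","warmup_epochs","label_smoothing","lr",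
--              "lr_schedule","batch_size","mixup","cutmix","grad_clip","nesterov"]
--     diffs = sorted(diffs, key=lambda x: (order.index(x.split("=")[0]) if x.split("=")[0] in order else 999, x))
--     return ", ".join(diffs) if diffs else "(mutations)"
-- ===== SOURCE B (Python) =====
-- def cfg_changes_string(prop_cfg: dict, inc_cfg: dict):
--     if not isinstance(prop_cfg, dict): prop_cfg = {}
--     if not isinstance(inc_cfg, dict):  inc_cfg  = {}
--     def fmt(k, v):
--         if isinstance(v, (int, float, str)) and len(str(v)) <= 16:
--             return f"{k}={v}"
--         return f"{k}*"
--     diffs = [fmt(k, v) for k, v in prop_cfg.items() if inc_cfg.get(k) != v]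
--     order = ["weight_decay","ema_decay","warmup_epochs","label_smoothing","lr",
--              "lr_schedule","batch_size","mixup","cutmix","grad_clip","nesterov"]
--     out = []
--     for key in order:
--         out.extend(sorted(d for d in diffs if d.split("=")[0] == key))
--     out.extend(sorted(d for d in diffs if d.split("=")[0] not in order))
--     return ", ".join(out) if out else "(mutations)"
-- ===== Notes on version B (the rewrite author's own statement) =====
-- stated objective: alternative
-- what changed: Phase 2 no longer sorts with a key that calls order.index per element: B walks the fixed priority list once, emitting a sorted bucket of diffs per priority prefix, then appends the alphabetically sorted non-priority tail.
import Mathlib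
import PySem

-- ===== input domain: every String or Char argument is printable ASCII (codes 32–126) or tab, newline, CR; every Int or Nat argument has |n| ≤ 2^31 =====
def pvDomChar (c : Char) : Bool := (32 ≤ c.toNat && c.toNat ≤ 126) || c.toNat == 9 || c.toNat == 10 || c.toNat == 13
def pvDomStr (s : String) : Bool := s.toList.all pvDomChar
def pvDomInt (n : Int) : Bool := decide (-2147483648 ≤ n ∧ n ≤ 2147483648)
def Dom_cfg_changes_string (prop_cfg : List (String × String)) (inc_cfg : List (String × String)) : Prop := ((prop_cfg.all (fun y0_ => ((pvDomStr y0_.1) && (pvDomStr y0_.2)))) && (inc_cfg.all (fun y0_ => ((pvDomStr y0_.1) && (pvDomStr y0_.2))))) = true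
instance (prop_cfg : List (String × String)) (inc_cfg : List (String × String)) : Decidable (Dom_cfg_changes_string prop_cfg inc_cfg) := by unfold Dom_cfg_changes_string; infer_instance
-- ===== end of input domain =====

-- B replaces A's sort keyed by (order.index, string) with a bucket pass: one sorted bucket per
-- priority key of order, then the alphabetically sorted non-priority tail (alternative decomposition).

-- shared constant: the priority order list of the Python source
def pvOrder : List String :=
  ["weight_decay","ema_decay","warmup_epochs","label_smoothing","lr",
   "lr_schedule","batch_size","mixup","cutmix","grad_clip","nesterov"]

-- x.split("=")[0], computed by both Pythons; split? is `some` exactly because "=" ≠ "",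
-- and the result of str.split is never empty, so neither default is ever taken
def pvPrefix (x : String) : String := PySem.List.pyGetD ((PySem.Str.split? x "=").getD []) 0 ""

-- A's sort key, first component: order.index(p) if p in order else 999
def pvK1 (x : String) : Int :=
  if pvOrder.contains (pvPrefix x) then (((PySem.List.index? pvOrder (pvPrefix x)).getD 0 : Nat) : Int) else 999

-- ===== PORT A =====
-- the diffs-building loop of A (append inside two nested ifs)
def pvDiffsA (prop_cfg : List (String × String)) (inc_cfg : List (String × String)) : List String :=
  (PySem.Dict.ofList prop_cfg).items.foldl
    (fun acc kv =>
      if ((PySem.Dict.ofList inc_cfg).get? kv.1 != some kv.2) then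
        (if PySem.Str.len kv.2 ≤ 16 then acc ++ [kv.1 ++ "=" ++ kv.2] else acc ++ [kv.1 ++ "*"])
      else acc) []

def cfg_changes_string (prop_cfg : List (String × String)) (inc_cfg : List (String × String)) : String :=
  if (PySem.List.sorted2 (pvDiffsA prop_cfg inc_cfg) pvK1 (fun x => x)).isEmpty then "(mutations)"
  else PySem.Str.join ", " (PySem.List.sorted2 (pvDiffsA prop_cfg inc_cfg) pvK1 (fun x => x))

-- ===== PORT B =====
def pvFmt (kv : String × String) : String :=
  if PySem.Str.len kv.2 ≤ 16 then kv.1 ++ "=" ++ kv.2 else kv.1 ++ "*"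

-- B's diffs: a comprehension (filter, then format)
def pvDiffsB (prop_cfg : List (String × String)) (inc_cfg : List (String × String)) : List String :=
  ((PySem.Dict.ofList prop_cfg).items.filter
      (fun kv => (PySem.Dict.ofList inc_cfg).get? kv.1 != some kv.2)).map pvFmt

-- B's output list: one sorted bucket per priority key, then the sorted non-priority tail
def pvOutB (prop_cfg : List (String × String)) (inc_cfg : List (String × String)) : List String :=
  (pvOrder.foldl
     (fun acc k => acc ++ PySem.List.sorted ((pvDiffsB prop_cfg inc_cfg).filter (fun d => pvPrefix d == k)) (fun x => x)) [])
  ++ PySem.List.sorted ((pvDiffsB prop_cfg inc_cfg).filter (fun d => !pvOrder.contains (pvPrefix d))) (fun x => x)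

def cfg_changes_string_alt (prop_cfg : List (String × String)) (inc_cfg : List (String × String)) : String :=
  if (pvOutB prop_cfg inc_cfg).isEmpty then "(mutations)"
  else PySem.Str.join ", " (pvOutB prop_cfg inc_cfg)

-- ===== PRECONDITION & SPEC =====
def Spec_cfg_changes_string (prop_cfg : List (String × String)) (inc_cfg : List (String × String)) (out : String) : Prop := out = cfg_changes_string_alt prop_cfg inc_cfg
instance (prop_cfg : List (String × String)) (inc_cfg : List (String × String)) (out : String) : Decidable (Spec_cfg_changes_string prop_cfg inc_cfg out) := by unfold Spec_cfg_changes_string; infer_instance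

-- ===== CLAIM (what is proved, stated in full; the proofs are below) =====
def Claim_equal_cfg_changes_string : Prop := ∀ (prop_cfg : List (String × String)) (inc_cfg : List (String × String)), Dom_cfg_changes_string prop_cfg inc_cfg → Spec_cfg_changes_string prop_cfg inc_cfg (cfg_changes_string prop_cfg inc_cfg)

-- ===== LEMMAS AND PROOFS =====

-- A's tuple sort key, packed into a single linearly ordered (lexicographic) key
def pvK (x : String) : Lex (Int × String) := toLex (pvK1 x, x)

theorem pvK_fst (x : String) : (ofLex (pvK x)).1 = pvK1 x := rfl
theorem pvK_snd (x : String) : (ofLex (pvK x)).2 = x := rfl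

theorem pvK_inj : Function.Injective pvK := by
  intro a b h
  exact congrArg (fun y : Lex (Int × String) => (ofLex y).2) h

-- A's two-component sort is the sort by the single key pvK
theorem sorted2_eq_sorted_lex (xs : List String) :
    PySem.List.sorted2 xs pvK1 (fun x => x) = PySem.List.sorted xs pvK := by
  rw [PySem.List.sorted_eq_foldl_insertBy]
  show xs.foldl
      (fun acc x => PySem.List.insertBy
        (fun a b => decide (pvK1 a < pvK1 b) || (!decide (pvK1 b < pvK1 a) && decide (a < b))) x acc) []
    = xs.foldl (fun acc x => PySem.List.insertBy (fun a b => decide (pvK a < pvK b)) x acc) []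
  have hb : (fun a b : String => decide (pvK1 a < pvK1 b) || (!decide (pvK1 b < pvK1 a) && decide (a < b)))
      = (fun a b : String => decide (pvK a < pvK b)) := by
    funext a b
    rcases lt_trichotomy (pvK1 a) (pvK1 b) with h | h | h
    · simp [pvK, Prod.Lex.lt_iff, h, asymm h]
    · simp [pvK, Prod.Lex.lt_iff, h]
    · simp [pvK, Prod.Lex.lt_iff, h, asymm h, h.ne']
  rw [hb]

-- the two phase-1 loops build the same diffs list
theorem diffs_eq (prop_cfg : List (String × String)) (inc_cfg : List (String × String)) :
    pvDiffsA prop_cfg inc_cfg = pvDiffsB prop_cfg inc_cfg := by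
  unfold pvDiffsA pvDiffsB
  have h : (fun (acc : List String) (kv : String × String) =>
      if ((PySem.Dict.ofList inc_cfg).get? kv.1 != some kv.2) then
        (if PySem.Str.len kv.2 ≤ 16 then acc ++ [kv.1 ++ "=" ++ kv.2] else acc ++ [kv.1 ++ "*"])
      else acc)
      = (fun acc kv =>
        if ((fun kv : String × String => (PySem.Dict.ofList inc_cfg).get? kv.1 != some kv.2) kv) = true then
          acc ++ [pvFmt kv] else acc) := by
    funext acc kv
    by_cases h1 : ((PySem.Dict.ofList inc_cfg).get? kv.1 != some kv.2) = true
    · simp only [pvFmt, h1, if_pos]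
      split <;> rfl
    · simp only [pvFmt, h1, Bool.false_eq_true, ite_false]
  rw [h, PySem.List.foldl_append_if]
  simp

-- splitting one filter along two disjoint boolean tests, up to permutation
theorem perm_filter_or {α : Type} (xs : List α) (p q : α → Bool)
    (hdisj : ∀ x, ¬(p x = true ∧ q x = true)) :
    (xs.filter (fun x => p x || q x)).Perm (xs.filter p ++ xs.filter q) := by
  induction xs with
  | nil => simp
  | cons x xs ih =>
    by_cases hp : p x = true
    · have hq : q x = false := by
        cases hq : q x
        · rfl
        · exact absurd ⟨hp, hq⟩ (hdisj x)
      simp only [List.filter_cons, hp, hq, Bool.true_or]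
      simp only [if_pos trivial]
      exact (ih.cons x).trans (by simp)
    · have hp' : p x = false := by simpa using hp
      by_cases hq : q x = true
      · simp [hp', hq]
        exact (ih.cons x).trans List.perm_middle.symm
      · have hq' : q x = false := by simpa using hq
        simp [hp', hq']
        exact ih

-- the concatenated buckets are a permutation of the diffs whose prefix is a priority key
theorem flat_perm (xs : List String) (ks : List String) (hnd : ks.Nodup) :
    (ks.flatMap (fun k => PySem.List.sorted (xs.filter (fun d => pvPrefix d == k)) (fun x => x))).Perm
      (xs.filter (fun d => ks.contains (pvPrefix d))) := by
  induction ks with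
  | nil => simp
  | cons k ks ih =>
    have hk : k ∉ ks := (List.nodup_cons.1 hnd).1
    have ih' := ih (List.nodup_cons.1 hnd).2
    have h1 : ((k :: ks).flatMap (fun k => PySem.List.sorted (xs.filter (fun d => pvPrefix d == k)) (fun x => x))).Perm
        (xs.filter (fun d => pvPrefix d == k) ++ xs.filter (fun d => ks.contains (pvPrefix d))) := by
      simp only [List.flatMap_cons]
      exact (PySem.List.sorted_perm _ _ _).append ih'
    refine h1.trans ?_
    refine ((perm_filter_or xs (fun d => pvPrefix d == k) (fun d => ks.contains (pvPrefix d)) ?_).symm).trans ?_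
    · rintro d ⟨h1', h2'⟩
      exact hk ((eq_of_beq h1') ▸ (List.contains_iff_mem.mp h2'))
    · apply List.Perm.of_eq
      apply List.filter_congr
      intro d _
      rw [List.contains_cons, beq_eq_decide]

theorem pvOrder_nodup : pvOrder.Nodup := by decide

-- the priority index of a bucket member, inside the walk over pvOrder
theorem k1_of_prefix (pre suf : List String) (k : String) (h : pvOrder = pre ++ k :: suf)
    (d : String) (hd : pvPrefix d = k) : pvK1 d = (pre.length : Int) := by
  have hmem : k ∈ pvOrder := by rw [h]; simp
  have hknotpre : k ∉ pre := by
    have hnd := pvOrder_nodup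
    rw [h] at hnd
    intro hc
    exact (List.nodup_append.mp hnd).2.2 k hc k List.mem_cons_self rfl
  have hidx : PySem.List.index? pvOrder k = some pre.length :=
    (PySem.List.index?_eq_some_iff pvOrder k pre.length).mpr ⟨pre, suf, h, rfl, hknotpre⟩
  unfold pvK1
  rw [hd, if_pos (List.contains_iff_mem.mpr hmem), hidx]
  rfl

-- the bucket concatenation over a suffix of pvOrder is key-sorted,
-- with all priority indices between |pre| and |pvOrder|
theorem pw_flat (xs : List String) :
    ∀ (suf pre : List String), pvOrder = pre ++ suf →
      List.Pairwise (fun a b => pvK a ≤ pvK b)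
        (suf.flatMap (fun k => PySem.List.sorted (xs.filter (fun d => pvPrefix d == k)) (fun x => x)))
      ∧ ∀ d ∈ suf.flatMap (fun k => PySem.List.sorted (xs.filter (fun d => pvPrefix d == k)) (fun x => x)),
          (pre.length : Int) ≤ pvK1 d ∧ pvK1 d < (pvOrder.length : Int) := by
  intro suf
  induction suf with
  | nil => intro pre _; simp
  | cons k suf ih =>
    intro pre h
    have h' : pvOrder = (pre ++ [k]) ++ suf := by simpa using h
    obtain ⟨ihpw, ihbd⟩ := ih (pre ++ [k]) h'
    have hbucket : ∀ d ∈ PySem.List.sorted (xs.filter (fun d => pvPrefix d == k)) (fun x => x),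
        pvK1 d = (pre.length : Int) := by
      intro d hd
      have hf : d ∈ xs.filter (fun d => pvPrefix d == k) := (PySem.List.mem_sorted _ _ _ _).mp hd
      exact k1_of_prefix pre suf k h d (by simpa using (List.mem_filter.mp hf).2)
    have hlen : (pre.length : Int) < (pvOrder.length : Int) := by
      rw [h]; simp only [List.length_append, List.length_cons]; push_cast; omega
    constructor
    · simp only [List.flatMap_cons]
      rw [List.pairwise_append]
      refine ⟨?_, ihpw, ?_⟩
      · have hsp := PySem.List.sorted_pairwise (xs.filter (fun d => pvPrefix d == k)) (fun x => x)
        exact List.Pairwise.imp_of_mem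
          (fun {a b} ha hb hab =>
            Prod.Lex.le_iff.mpr (Or.inr ⟨by rw [pvK_fst, pvK_fst, hbucket a ha, hbucket b hb], by rw [pvK_snd, pvK_snd]; exact hab⟩)) hsp
      · intro a ha b hb
        have h1 := hbucket a ha
        have h2 := (ihbd b hb).1
        refine Prod.Lex.le_iff.mpr (Or.inl ?_)
        rw [pvK_fst, pvK_fst, h1]
        simp only [List.length_append, List.length_cons, List.length_nil] at h2
        push_cast at h2 ⊢
        omega
    · intro d hd
      simp only [List.flatMap_cons, List.mem_append] at hd
      rcases hd with hd | hd
      · exact ⟨le_of_eq (hbucket d hd).symm, by rw [hbucket d hd]; exact hlen⟩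
      · refine ⟨?_, (ihbd d hd).2⟩
        have h2 := (ihbd d hd).1
        simp only [List.length_append, List.length_cons, List.length_nil] at h2
        push_cast at h2 ⊢
        omega

-- every non-priority diff has key 999
theorem k1_of_not_contains (d : String) (h : pvOrder.contains (pvPrefix d) = false) :
    pvK1 d = 999 := by
  have hne : ¬ (pvOrder.contains (pvPrefix d) = true) := by rw [h]; simp
  unfold pvK1
  rw [if_neg hne]

-- the sorted list under pvK equals B's bucket concatenation
theorem main_eq (xs : List String) :
    PySem.List.sorted xs pvK =
      (pvOrder.flatMap (fun k => PySem.List.sorted (xs.filter (fun d => pvPrefix d == k)) (fun x => x)))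
      ++ PySem.List.sorted (xs.filter (fun d => !pvOrder.contains (pvPrefix d))) (fun x => x) := by
  have hrest999 : ∀ d ∈ PySem.List.sorted (xs.filter (fun d => !pvOrder.contains (pvPrefix d))) (fun x => x),
      pvK1 d = 999 := by
    intro d hd
    have hf : d ∈ xs.filter (fun d => !pvOrder.contains (pvPrefix d)) := (PySem.List.mem_sorted _ _ _ _).mp hd
    have := (List.mem_filter.mp hf).2
    exact k1_of_not_contains d (by simpa using this)
  refine PySem.List.eq_of_perm_of_pairwise_le_of_injective pvK pvK_inj ?_ ?_ ?_
  · -- permutation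
    refine (PySem.List.sorted_perm xs pvK false).trans ?_
    have hflat := flat_perm xs pvOrder pvOrder_nodup
    have hrest := PySem.List.sorted_perm (xs.filter (fun d => !pvOrder.contains (pvPrefix d))) (fun x => x) false
    have hsplit := List.filter_append_perm (fun d => pvOrder.contains (pvPrefix d)) xs
    exact (hsplit.symm.trans ((hflat.append hrest).symm)).symm.symm
  · exact PySem.List.sorted_pairwise xs pvK
  · rw [List.pairwise_append]
    refine ⟨(pw_flat xs pvOrder [] rfl).1, ?_, ?_⟩
    · have hsp := PySem.List.sorted_pairwise (xs.filter (fun d => !pvOrder.contains (pvPrefix d))) (fun x => x)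
      exact List.Pairwise.imp_of_mem
        (fun {a b} ha hb hab =>
          Prod.Lex.le_iff.mpr (Or.inr ⟨by rw [pvK_fst, pvK_fst, hrest999 a ha, hrest999 b hb], by rw [pvK_snd, pvK_snd]; exact hab⟩)) hsp
    · intro a ha b hb
      have h1 := (pw_flat xs pvOrder [] rfl).2 a ha
      have h2 := hrest999 b hb
      refine Prod.Lex.le_iff.mpr (Or.inl ?_)
      rw [pvK_fst, pvK_fst, h2]
      have hl : (pvOrder.length : Int) = 11 := by rfl
      rw [hl] at h1
      omega

-- ===== VERDICT (by name: the statement is the Claim_ definition above) =====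
theorem cfg_changes_string_spec : Claim_equal_cfg_changes_string := by
  intro prop_cfg inc_cfg _
  unfold Spec_cfg_changes_string cfg_changes_string cfg_changes_string_alt
  have hlist : PySem.List.sorted2 (pvDiffsA prop_cfg inc_cfg) pvK1 (fun x => x) = pvOutB prop_cfg inc_cfg := by
    rw [diffs_eq, sorted2_eq_sorted_lex, main_eq]
    unfold pvOutB
    rw [PySem.List.foldl_append_eq_flatMap]
    simp
  rw [hlist]
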